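-- pv_equiv track=rewrite | github.com/adaptco/Sandbox | qube_runtime.py | is_collision_ahead
-- ===== SOURCE A (Python) =====
-- def is_collision_ahead(voxel_bits: int, direction: str) -> bool:
--     """Check if voxels in given direction are occupied."""
--     # Map direction to bit positions in 3x3x3 cube
--     direction_map = {
--         "forward": [2, 5, 8, 11, 14, 17, 20, 23, 26],  # Front face
--         "backward": [0, 3, 6, 9, 12, 15, 18, 21, 24],  # Back face
--         "left": [0, 1, 2, 9, 10, 11, 18, 19, 20],      # Left face
--         "right": [6, 7, 8, 15, 16, 17, 24, 25, 26],    # Right face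
--     }
--
--     bits_to_check = direction_map.get(direction, [])
--
--     for bit_pos in bits_to_check:
--         if voxel_bits & (1 << bit_pos):
--             return True
--
--     return False
-- ===== SOURCE B (Python) =====
-- # Each direction's face is a single precomputed bitmask (OR of 1<<b over its 9 voxel positions).
-- _DIRECTION_MASKS = {
--     "forward": sum(1 << b for b in (2, 5, 8, 11, 14, 17, 20, 23, 26)),
--     "backward": sum(1 << b for b in (0, 3, 6, 9, 12, 15, 18, 21, 24)),
--     "left": sum(1 << b for b in (0, 1, 2, 9, 10, 11, 18, 19, 20)),
--     "right": sum(1 << b for b in (6, 7, 8, 15, 16, 17, 24, 25, 26)),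
-- }
--
--
-- def is_collision_ahead(voxel_bits: int, direction: str) -> bool:
--     """Check if voxels in given direction are occupied."""
--     return bool(voxel_bits & _DIRECTION_MASKS.get(direction, 0))
-- ===== Notes on version B (the rewrite author's own statement) =====
-- stated objective: idiomatic
-- what changed: The per-direction list of bit positions and the early-return loop are replaced by one precomputed integer bitmask per direction; the answer is a single AND of voxel_bits with the looked-up mask (default 0), no loop at all.
import Mathlib
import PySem

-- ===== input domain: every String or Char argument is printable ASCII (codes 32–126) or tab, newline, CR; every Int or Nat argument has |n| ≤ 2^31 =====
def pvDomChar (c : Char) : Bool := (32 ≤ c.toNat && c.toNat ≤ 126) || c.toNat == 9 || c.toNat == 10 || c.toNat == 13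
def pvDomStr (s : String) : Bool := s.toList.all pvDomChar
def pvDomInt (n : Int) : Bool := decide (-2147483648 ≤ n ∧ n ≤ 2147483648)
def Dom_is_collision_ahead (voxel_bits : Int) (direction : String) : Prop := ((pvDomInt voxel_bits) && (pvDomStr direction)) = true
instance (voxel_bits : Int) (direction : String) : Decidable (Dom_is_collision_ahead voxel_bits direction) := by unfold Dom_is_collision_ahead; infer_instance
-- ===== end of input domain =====

-- B replaces A's per-direction position lists and early-return loop by one precomputed bitmask
-- per direction and a single AND (idiomatic; no speed claim).

-- ===== PORT A =====
-- the for-loop with early 'return True' over bits_to_check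
def icaLoop (voxel_bits : Int) : List Nat → Bool
  | [] => false
  | bit_pos :: rest =>
      if PySem.Int.band voxel_bits (((1 <<< bit_pos : Nat) : Int)) ≠ 0 then true
      else icaLoop voxel_bits rest

def is_collision_ahead (voxel_bits : Int) (direction : String) : Bool :=
  let direction_map : PySem.Dict String (List Nat) := PySem.Dict.ofList
    [("forward",  [2, 5, 8, 11, 14, 17, 20, 23, 26]),
     ("backward", [0, 3, 6, 9, 12, 15, 18, 21, 24]),
     ("left",     [0, 1, 2, 9, 10, 11, 18, 19, 20]),
     ("right",    [6, 7, 8, 15, 16, 17, 24, 25, 26])]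
  let bits_to_check := PySem.Dict.getD direction_map direction []
  icaLoop voxel_bits bits_to_check

-- ===== PORT B =====
-- module-level dict of precomputed masks: sum(1 << b for b in positions)
def directionMasks : PySem.Dict String Int := PySem.Dict.ofList
  [("forward",  (([2, 5, 8, 11, 14, 17, 20, 23, 26] : List Nat).map (fun b => ((1 <<< b : Nat) : Int))).sum),
   ("backward", (([0, 3, 6, 9, 12, 15, 18, 21, 24] : List Nat).map (fun b => ((1 <<< b : Nat) : Int))).sum),
   ("left",     (([0, 1, 2, 9, 10, 11, 18, 19, 20] : List Nat).map (fun b => ((1 <<< b : Nat) : Int))).sum),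
   ("right",    (([6, 7, 8, 15, 16, 17, 24, 25, 26] : List Nat).map (fun b => ((1 <<< b : Nat) : Int))).sum)]

def is_collision_ahead_alt (voxel_bits : Int) (direction : String) : Bool :=
  decide (PySem.Int.band voxel_bits (PySem.Dict.getD directionMasks direction 0) ≠ 0)

-- ===== PRECONDITION & SPEC =====
def Spec_is_collision_ahead (voxel_bits : Int) (direction : String) (out : Bool) : Prop := out = is_collision_ahead_alt voxel_bits direction
instance (voxel_bits : Int) (direction : String) (out : Bool) : Decidable (Spec_is_collision_ahead voxel_bits direction out) := by unfold Spec_is_collision_ahead; infer_instance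

-- ===== CLAIM (what is proved, stated in full; the proofs are below) =====
def Claim_equal_is_collision_ahead : Prop := ∀ (voxel_bits : Int) (direction : String), Dom_is_collision_ahead voxel_bits direction → Spec_is_collision_ahead voxel_bits direction (is_collision_ahead voxel_bits direction)

-- ===== LEMMAS AND PROOFS =====

-- Python's n's bit k in infinite two's complement
def pyTestBit (n : Int) (k : Nat) : Bool :=
  if 0 ≤ n then n.toNat.testBit k else !((-n - 1).toNat.testBit k)

theorem nat_ne_zero_iff_testBit (x : Nat) : x ≠ 0 ↔ ∃ k, x.testBit k = true := by
  constructor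
  · intro h
    by_contra hc
    push_neg at hc
    exact h (Nat.eq_of_testBit_eq (fun i => by simp [Nat.zero_testBit, hc i]))
  · rintro ⟨k, hk⟩ rfl
    simp [Nat.zero_testBit] at hk

theorem band_mask_ne (n : Int) (M : Nat) :
    PySem.Int.band n ((M : Nat) : Int) ≠ 0 ↔ ∃ k, M.testBit k = true ∧ pyTestBit n k = true := by
  by_cases hn : 0 ≤ n
  · have : PySem.Int.band n ((M : Nat) : Int) = ((n.toNat &&& M : Nat) : Int) := by
      simp [PySem.Int.band, hn]
    rw [this]
    simp only [pyTestBit, hn, if_pos]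
    rw [show (((n.toNat &&& M : Nat) : Int) ≠ 0) ↔ ((n.toNat &&& M : Nat) ≠ 0) by exact_mod_cast Iff.rfl]
    rw [nat_ne_zero_iff_testBit]
    constructor
    · rintro ⟨k, hk⟩
      rw [Nat.testBit_and] at hk
      exact ⟨k, (Bool.and_eq_true _ _ ▸ hk).2, (Bool.and_eq_true _ _ ▸ hk).1⟩
    · rintro ⟨k, h1, h2⟩
      exact ⟨k, by rw [Nat.testBit_and, h1, h2]; rfl⟩
  · have hneg : ¬ (0 ≤ n) := hn
    set m := (-n - 1).toNat with hm
    have hb : PySem.Int.band n ((M : Nat) : Int) = ((M - (M &&& m) : Nat) : Int) := by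
      simp [PySem.Int.band, hneg, hm]
    rw [hb]
    simp only [pyTestBit, hneg, if_neg, not_false_eq_true, ← hm]
    rw [show (((M - (M &&& m) : Nat) : Int) ≠ 0) ↔ ((M - (M &&& m) : Nat) ≠ 0) by exact_mod_cast Iff.rfl]
    have hle : M &&& m ≤ M := Nat.and_le_left
    constructor
    · intro h
      have hne : M &&& m ≠ M := by omega
      by_contra hc
      push_neg at hc
      apply hne
      apply Nat.eq_of_testBit_eq
      intro i
      rw [Nat.testBit_and]
      by_cases hMi : M.testBit i = true
      · have hmi : m.testBit i = true := by
          have := hc i hMi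
          cases h' : m.testBit i
          · simp [h'] at this
          · rfl
        rw [hMi, hmi]; rfl
      · rw [Bool.not_eq_true] at hMi
        rw [hMi, Bool.false_and]
    · rintro ⟨k, h1, h2⟩
      have hmk : m.testBit k = false := by
        cases h' : m.testBit k
        · rfl
        · simp [h'] at h2
      have : (M &&& m).testBit k = false := by rw [Nat.testBit_and, hmk, Bool.and_false]
      intro hzero
      have hMeq : M &&& m = M := by omega
      rw [hMeq] at this
      rw [this] at h1
      exact Bool.false_ne_true h1

theorem band_bit_ne (n : Int) (p : Nat) :
    (PySem.Int.band n (((1 <<< p : Nat) : Int)) ≠ 0) ↔ pyTestBit n p = true := by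
  rw [band_mask_ne]
  constructor
  · rintro ⟨k, h1, h2⟩
    rw [Nat.shiftLeft_eq, one_mul, Nat.testBit_two_pow] at h1
    have : p = k := of_decide_eq_true h1
    rwa [← this] at h2
  · intro h
    exact ⟨p, by simp [Nat.shiftLeft_eq], h⟩

theorem icaLoop_eq (n : Int) (ps : List Nat) :
    icaLoop n ps = ps.any (fun p => pyTestBit n p) := by
  induction ps with
  | nil => rfl
  | cons p rest ih =>
    rw [icaLoop, List.any_cons]
    by_cases h : PySem.Int.band n (((1 <<< p : Nat) : Int)) ≠ 0
    · rw [if_pos h, ((band_bit_ne n p).mp h), Bool.true_or]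
    · rw [if_neg h, ih]
      have : pyTestBit n p = false := by
        cases h' : pyTestBit n p
        · rfl
        · exact absurd ((band_bit_ne n p).mpr h') h
      rw [this, Bool.false_or]

-- bits of a mask below 2^32 are exactly a given position list
theorem mask_exists_iff (M : Nat) (ps : List Nat) (hM : M < 2 ^ 32)
    (h : ∀ k < 32, (M.testBit k = true ↔ k ∈ ps)) (hps : ∀ p ∈ ps, p < 32)
    (P : Nat → Bool) :
    (∃ k, M.testBit k = true ∧ P k = true) ↔ ∃ p ∈ ps, P p = true := by
  constructor
  · rintro ⟨k, h1, h2⟩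
    have hk : k < 32 := by
      by_contra hk
      push_neg at hk
      have : M < 2 ^ k := lt_of_lt_of_le hM (Nat.pow_le_pow_right (by norm_num) hk)
      rw [Nat.testBit_lt_two_pow this] at h1
      exact Bool.false_ne_true h1
    exact ⟨k, (h k hk).mp h1, h2⟩
  · rintro ⟨p, hp, h2⟩
    exact ⟨p, (h p (hps p hp)).mpr hp, h2⟩

-- the one fact per direction: loop over the list = single AND with the mask
theorem dir_eq (n : Int) (ps : List Nat) (M : Nat) (hM : M < 2 ^ 32)
    (h : ∀ k < 32, (M.testBit k = true ↔ k ∈ ps)) (hps : ∀ p ∈ ps, p < 32) :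
    icaLoop n ps = decide (PySem.Int.band n ((M : Nat) : Int) ≠ 0) := by
  rw [icaLoop_eq]
  have := (band_mask_ne n M).trans (mask_exists_iff M ps hM h hps (fun p => pyTestBit n p))
  rw [Bool.eq_iff_iff]
  simp only [List.any_eq_true, decide_eq_true_eq]
  exact (this.trans (Iff.rfl)).symm

-- ===== VERDICT (by name: the statement is the Claim_ definition above) =====
theorem is_collision_ahead_spec : Claim_equal_is_collision_ahead := by
  intro vb dir _
  unfold Spec_is_collision_ahead is_collision_ahead is_collision_ahead_alt directionMasks
  by_cases h1 : dir = "forward"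
  · subst h1
    show icaLoop vb [2, 5, 8, 11, 14, 17, 20, 23, 26] = decide (PySem.Int.band vb ((76695844 : Nat) : Int) ≠ 0)
    exact dir_eq vb _ 76695844 (by norm_num) (by decide) (by decide)
  · by_cases h2 : dir = "backward"
    · subst h2
      show icaLoop vb [0, 3, 6, 9, 12, 15, 18, 21, 24] = decide (PySem.Int.band vb ((19173961 : Nat) : Int) ≠ 0)
      exact dir_eq vb _ 19173961 (by norm_num) (by decide) (by decide)
    · by_cases h3 : dir = "left"
      · subst h3
        show icaLoop vb [0, 1, 2, 9, 10, 11, 18, 19, 20] = decide (PySem.Int.band vb ((1838599 : Nat) : Int) ≠ 0)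
        exact dir_eq vb _ 1838599 (by norm_num) (by decide) (by decide)
      · by_cases h4 : dir = "right"
        · subst h4
          show icaLoop vb [6, 7, 8, 15, 16, 17, 24, 25, 26] = decide (PySem.Int.band vb ((117670336 : Nat) : Int) ≠ 0)
          exact dir_eq vb _ 117670336 (by norm_num) (by decide) (by decide)
        · -- unknown direction: empty position list vs. default mask 0
          have hb1 : ("forward" == dir) = false := by rw [beq_eq_false_iff_ne]; exact fun h => h1 h.symm
          have hb2 : ("backward" == dir) = false := by rw [beq_eq_false_iff_ne]; exact fun h => h2 h.symm
          have hb3 : ("left" == dir) = false := by rw [beq_eq_false_iff_ne]; exact fun h => h3 h.symm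
          have hb4 : ("right" == dir) = false := by rw [beq_eq_false_iff_ne]; exact fun h => h4 h.symm
          simp only [PySem.Dict.getD, PySem.Dict.get?]
          have hA : (PySem.Dict.ofList
              [("forward",  ([2, 5, 8, 11, 14, 17, 20, 23, 26] : List Nat)),
               ("backward", [0, 3, 6, 9, 12, 15, 18, 21, 24]),
               ("left",     [0, 1, 2, 9, 10, 11, 18, 19, 20]),
               ("right",    [6, 7, 8, 15, 16, 17, 24, 25, 26])]).items
              = [("forward",  [2, 5, 8, 11, 14, 17, 20, 23, 26]),
                 ("backward", [0, 3, 6, 9, 12, 15, 18, 21, 24]),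
                 ("left",     [0, 1, 2, 9, 10, 11, 18, 19, 20]),
                 ("right",    [6, 7, 8, 15, 16, 17, 24, 25, 26])] := by decide
          rw [hA]
          simp only [List.find?, hb1, hb2, hb3, hb4, Option.map_none, Option.getD_none]
          show icaLoop vb [] = decide (PySem.Int.band vb (((PySem.Dict.ofList [("forward", (76695844:Int)), ("backward", 19173961), ("left", 1838599), ("right", 117670336)]).get? dir).getD 0) ≠ 0)
          have hB : (PySem.Dict.ofList [("forward", (76695844:Int)), ("backward", 19173961), ("left", 1838599), ("right", 117670336)]).items
              = [("forward", 76695844), ("backward", 19173961), ("left", 1838599), ("right", 117670336)] := by decide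
          simp only [PySem.Dict.get?, hB, List.find?, hb1, hb2, hb3, hb4, Option.map_none, Option.getD_none]
          simp [icaLoop, PySem.Int.band_zero]
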